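-- pv_equiv track=rewrite | github.com/aerusakovich/nf_nanocirc_long_read | bin/smart_merge.py | vote_struct_groups
-- ===== SOURCE A (Python) =====
-- STRUCT_PRIORITY = ['isocirc', 'cirilong', 'circnick', 'circfl']
--
-- def vote_struct_groups(groups):
--     """
--     Vote over a list of [abs_struct_rep, [tools]].
--     Plurality wins; ties broken by STRUCT_PRIORITY.
--     Returns (winning_index, agree_count).
--     """
--     max_count = max(len(tools) for _, tools in groups)
--     winners   = [i for i, (_, tools) in enumerate(groups)
--                  if len(tools) == max_count]
--
--     if len(winners) == 1:
--         return winners[0], max_count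
--
--     for prio_tool in STRUCT_PRIORITY:
--         for idx in winners:
--             if prio_tool in groups[idx][1]:
--                 return idx, max_count
--
--     return winners[0], max_count
-- ===== SOURCE B (Python) =====
-- STRUCT_PRIORITY = ['isocirc', 'cirilong', 'circnick', 'circfl']
--
-- def vote_struct_groups(groups):
--     """Plurality vote with STRUCT_PRIORITY tie-break, as a single argmin
--     under a per-winner priority-rank key (min returns the first minimum,
--     so index order is the final tie-break)."""
--     rank_map = {t: r for r, t in enumerate(STRUCT_PRIORITY)}
--     max_count = max(len(tools) for _, tools in groups)
--     best = min((i for i, (_, tools) in enumerate(groups) if len(tools) == max_count),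
--                key=lambda i: min((rank_map[t] for t in groups[i][1] if t in rank_map),
--                                  default=len(STRUCT_PRIORITY)))
--     return best, max_count
-- ===== Notes on version B (the rewrite author's own statement) =====
-- stated objective: simpler
-- what changed: The nested priority-outer/winner-inner scan plus the singleton early-return is collapsed into one argmin: each plurality winner gets a key = rank of its best priority tool (default len(STRUCT_PRIORITY)), and min (first minimum, so index order breaks key ties) picks the winner.
import Mathlib
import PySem

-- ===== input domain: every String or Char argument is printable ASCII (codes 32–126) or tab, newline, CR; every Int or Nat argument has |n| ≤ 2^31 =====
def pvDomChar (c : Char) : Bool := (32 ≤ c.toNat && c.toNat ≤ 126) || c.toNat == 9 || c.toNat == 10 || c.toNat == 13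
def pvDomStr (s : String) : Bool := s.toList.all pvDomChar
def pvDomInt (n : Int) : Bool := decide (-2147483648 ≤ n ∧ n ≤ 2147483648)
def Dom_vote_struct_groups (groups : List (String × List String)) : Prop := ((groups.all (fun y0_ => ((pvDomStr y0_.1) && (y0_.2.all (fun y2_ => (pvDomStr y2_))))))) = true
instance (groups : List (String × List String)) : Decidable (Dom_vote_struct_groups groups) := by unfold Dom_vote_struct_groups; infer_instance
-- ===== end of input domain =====

-- B collapses A's nested priority/winner scans into one argmin with a priority-rank key (objective: simpler).

-- ===== PORT A =====
def STRUCT_PRIORITY : List String := ["isocirc", "cirilong", "circnick", "circfl"]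

-- inner loop 'for idx in winners: if prio_tool in groups[idx][1]: return idx'
def pvInnerScan (groups : List (String × List String)) (prio : String) : List Int → Option Int
  | [] => none
  | idx :: rest =>
      if prio ∈ (PySem.List.pyGetD groups idx ("", ([] : List String))).2 then some idx
      else pvInnerScan groups prio rest

-- outer loop 'for prio_tool in STRUCT_PRIORITY: …'
def pvOuterScan (groups : List (String × List String)) : List String → List Int → Option Int
  | [], _ => none
  | p :: ps, ws =>
      match pvInnerScan groups p ws with
      | some idx => some idx
      | none => pvOuterScan groups ps ws

def vote_struct_groups (groups : List (String × List String)) : Int × Int :=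
  -- max() raises ValueError on empty groups: excluded by Pre_; the none arm is unreachable under Pre_
  match PySem.List.max? (groups.map (fun g => (g.2.length : Int))) (fun x => x) with
  | none => (0, 0)
  | some max_count =>
    let winners : List Int :=
      ((PySem.List.enumerate groups 0).filter
        (fun p => decide ((p.2.2.length : Int) = max_count))).map (fun p => p.1)
    if winners.length = 1 then (PySem.List.pyGetD winners 0 0, max_count)
    else
      match pvOuterScan groups STRUCT_PRIORITY winners with
      | some idx => (idx, max_count)
      | none => (PySem.List.pyGetD winners 0 0, max_count)

-- ===== PORT B =====
-- rank_map = {t: r for r, t in enumerate(STRUCT_PRIORITY)}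
def pvRankMap : PySem.Dict String Int :=
  PySem.Dict.ofList ((PySem.List.enumerate STRUCT_PRIORITY 0).map (fun p => (p.2, p.1)))

-- key: min((rank_map[t] for t in groups[i][1] if t in rank_map), default=len(STRUCT_PRIORITY))
def pvRank (groups : List (String × List String)) (i : Int) : Int :=
  PySem.List.minD
    ((PySem.List.pyGetD groups i ("", ([] : List String))).2.filterMap (fun t => pvRankMap.get? t))
    (fun x => x) (STRUCT_PRIORITY.length : Int)

def vote_struct_groups_alt (groups : List (String × List String)) : Int × Int :=
  -- max() raises ValueError on empty groups: excluded by Pre_; both none arms are unreachable under Pre_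
  match PySem.List.max? (groups.map (fun g => (g.2.length : Int))) (fun x => x) with
  | none => (0, 0)
  | some max_count =>
    match PySem.List.min?
        (((PySem.List.enumerate groups 0).filter
            (fun p => decide ((p.2.2.length : Int) = max_count))).map (fun p => p.1))
        (fun i => pvRank groups i) with
    | some best => (best, max_count)
    | none => (0, 0)

-- ===== PRECONDITION & SPEC =====
-- Python A raises ValueError (max() of an empty sequence) on groups = []; that is all Pre_ excludes.
def Pre_vote_struct_groups (groups : List (String × List String)) : Prop := groups ≠ []
instance (groups : List (String × List String)) : Decidable (Pre_vote_struct_groups groups) := by unfold Pre_vote_struct_groups; infer_instance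
def pvWitness_vote_struct_groups : (List (String × List String)) := [("a", ["isocirc", "circfl"]), ("b", ["cirilong", "other"])]

def Spec_vote_struct_groups (groups : List (String × List String)) (out : Int × Int) : Prop := out = vote_struct_groups_alt groups
instance (groups : List (String × List String)) (out : Int × Int) : Decidable (Spec_vote_struct_groups groups out) := by unfold Spec_vote_struct_groups; infer_instance

-- ===== CLAIM (what is proved, stated in full; the proofs are below) =====
def Claim_equal_vote_struct_groups : Prop := ∀ (groups : List (String × List String)), Dom_vote_struct_groups groups → Pre_vote_struct_groups groups → Spec_vote_struct_groups groups (vote_struct_groups groups)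

-- ===== LEMMAS AND PROOFS =====

-- the rank key written as a membership chain
def pvChain (ts : List String) : Int :=
  if "isocirc" ∈ ts then 0 else if "cirilong" ∈ ts then 1
  else if "circnick" ∈ ts then 2 else if "circfl" ∈ ts then 3 else 4

lemma pvRankMap_get? (t : String) :
    pvRankMap.get? t =
      if "isocirc" = t then some 0 else if "cirilong" = t then some 1
      else if "circnick" = t then some 2 else if "circfl" = t then some 3 else none := by
  have h : pvRankMap = PySem.Dict.mk
      [("isocirc", (0 : Int)), ("cirilong", 1), ("circnick", 2), ("circfl", 3)] := rfl
  rw [h]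
  simp only [PySem.Dict.get?_mk_cons, beq_iff_eq,
    show (PySem.Dict.mk ([] : List (String × Int))).get? t = none from rfl]

lemma pvMemRankList (ts : List String) (x : Int) :
    x ∈ ts.filterMap (fun t => pvRankMap.get? t) ↔
      (x = 0 ∧ "isocirc" ∈ ts) ∨ (x = 1 ∧ "cirilong" ∈ ts) ∨
      (x = 2 ∧ "circnick" ∈ ts) ∨ (x = 3 ∧ "circfl" ∈ ts) := by
  constructor
  · intro hx
    rcases List.mem_filterMap.1 hx with ⟨t, ht, hsome⟩
    rw [pvRankMap_get? t] at hsome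
    split_ifs at hsome with h1 h2 h3 h4 <;> simp_all
  · rintro (⟨rfl, h⟩ | ⟨rfl, h⟩ | ⟨rfl, h⟩ | ⟨rfl, h⟩)
    · exact List.mem_filterMap.2 ⟨"isocirc", h, by decide⟩
    · exact List.mem_filterMap.2 ⟨"cirilong", h, by decide⟩
    · exact List.mem_filterMap.2 ⟨"circnick", h, by decide⟩
    · exact List.mem_filterMap.2 ⟨"circfl", h, by decide⟩

lemma pvRank_eq_chain (groups : List (String × List String)) (i : Int) :
    pvRank groups i = pvChain (PySem.List.pyGetD groups i ("", ([] : List String))).2 := by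
  unfold pvRank PySem.List.minD
  set ts := (PySem.List.pyGetD groups i ("", ([] : List String))).2 with hts
  rw [show ((STRUCT_PRIORITY.length : Nat) : Int) = 4 from rfl]
  cases h : PySem.List.min? (ts.filterMap (fun t => pvRankMap.get? t)) (fun x => x) with
  | none =>
      have hnil := (PySem.List.min?_eq_none_iff _ _).1 h
      have h0 : "isocirc" ∉ ts := fun hm => by
        have := (pvMemRankList ts 0).2 (Or.inl ⟨rfl, hm⟩); rw [hnil] at this; simp at this
      have h1 : "cirilong" ∉ ts := fun hm => by
        have := (pvMemRankList ts 1).2 (Or.inr (Or.inl ⟨rfl, hm⟩)); rw [hnil] at this; simp at this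
      have h2 : "circnick" ∉ ts := fun hm => by
        have := (pvMemRankList ts 2).2 (Or.inr (Or.inr (Or.inl ⟨rfl, hm⟩))); rw [hnil] at this; simp at this
      have h3 : "circfl" ∉ ts := fun hm => by
        have := (pvMemRankList ts 3).2 (Or.inr (Or.inr (Or.inr ⟨rfl, hm⟩))); rw [hnil] at this; simp at this
      simp [pvChain, h0, h1, h2, h3]
  | some mv =>
      simp only [Option.getD]
      have hm := (pvMemRankList ts mv).1 (PySem.List.min?_mem h)
      have hmin := PySem.List.min?_isMin h
      unfold pvChain
      split_ifs with c0 c1 c2 c3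
      · have := hmin 0 ((pvMemRankList ts 0).2 (Or.inl ⟨rfl, c0⟩))
        rcases hm with ⟨rfl, hmem⟩ | ⟨rfl, hmem⟩ | ⟨rfl, hmem⟩ | ⟨rfl, hmem⟩ <;> omega
      · have := hmin 1 ((pvMemRankList ts 1).2 (Or.inr (Or.inl ⟨rfl, c1⟩)))
        rcases hm with ⟨rfl, hmem⟩ | ⟨rfl, hmem⟩ | ⟨rfl, hmem⟩ | ⟨rfl, hmem⟩ <;>
          first | exact absurd hmem c0 | omega
      · have := hmin 2 ((pvMemRankList ts 2).2 (Or.inr (Or.inr (Or.inl ⟨rfl, c2⟩))))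
        rcases hm with ⟨rfl, hmem⟩ | ⟨rfl, hmem⟩ | ⟨rfl, hmem⟩ | ⟨rfl, hmem⟩ <;>
          first | exact absurd hmem c0 | exact absurd hmem c1 | omega
      · have := hmin 3 ((pvMemRankList ts 3).2 (Or.inr (Or.inr (Or.inr ⟨rfl, c3⟩))))
        rcases hm with ⟨rfl, hmem⟩ | ⟨rfl, hmem⟩ | ⟨rfl, hmem⟩ | ⟨rfl, hmem⟩ <;>
          first | exact absurd hmem c0 | exact absurd hmem c1 | exact absurd hmem c2 | omega
      · rcases hm with ⟨rfl, hmem⟩ | ⟨rfl, hmem⟩ | ⟨rfl, hmem⟩ | ⟨rfl, hmem⟩ <;>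
          first | exact absurd hmem c0 | exact absurd hmem c1 | exact absurd hmem c2 | exact absurd hmem c3

lemma pvChain_nonneg (ts : List String) : 0 ≤ pvChain ts := by
  unfold pvChain; split_ifs <;> norm_num

lemma pvChain_eq_zero_iff (ts : List String) : pvChain ts = 0 ↔ "isocirc" ∈ ts := by
  unfold pvChain; split_ifs <;> simp_all

lemma pvChain_lb1 (ts : List String) (h0 : "isocirc" ∉ ts) : 1 ≤ pvChain ts := by
  unfold pvChain; rw [if_neg h0]; split_ifs <;> norm_num

lemma pvChain_eq_one_iff (ts : List String) (h0 : "isocirc" ∉ ts) :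
    pvChain ts = 1 ↔ "cirilong" ∈ ts := by
  unfold pvChain; rw [if_neg h0]; split_ifs <;> simp_all

lemma pvChain_lb2 (ts : List String) (h0 : "isocirc" ∉ ts) (h1 : "cirilong" ∉ ts) :
    2 ≤ pvChain ts := by
  unfold pvChain; rw [if_neg h0, if_neg h1]; split_ifs <;> norm_num

lemma pvChain_eq_two_iff (ts : List String) (h0 : "isocirc" ∉ ts) (h1 : "cirilong" ∉ ts) :
    pvChain ts = 2 ↔ "circnick" ∈ ts := by
  unfold pvChain; rw [if_neg h0, if_neg h1]; split_ifs <;> simp_all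

lemma pvChain_lb3 (ts : List String) (h0 : "isocirc" ∉ ts) (h1 : "cirilong" ∉ ts)
    (h2 : "circnick" ∉ ts) : 3 ≤ pvChain ts := by
  unfold pvChain; rw [if_neg h0, if_neg h1, if_neg h2]; split_ifs <;> norm_num

lemma pvChain_eq_three_iff (ts : List String) (h0 : "isocirc" ∉ ts) (h1 : "cirilong" ∉ ts)
    (h2 : "circnick" ∉ ts) : pvChain ts = 3 ↔ "circfl" ∈ ts := by
  unfold pvChain; rw [if_neg h0, if_neg h1, if_neg h2]; split_ifs <;> simp_all

lemma pvChain_eq_four (ts : List String) (h0 : "isocirc" ∉ ts) (h1 : "cirilong" ∉ ts)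
    (h2 : "circnick" ∉ ts) (h3 : "circfl" ∉ ts) : pvChain ts = 4 := by
  simp [pvChain, h0, h1, h2, h3]

lemma pvInnerScan_eq_find? (groups : List (String × List String)) (p : String) (ws : List Int) :
    pvInnerScan groups p ws
      = ws.find? (fun i => decide (p ∈ (PySem.List.pyGetD groups i ("", ([] : List String))).2)) := by
  induction ws with
  | nil => rfl
  | cons w t ih => simp only [pvInnerScan, List.find?]; split_ifs with h <;> simp [h, ih]

lemma pvFind?_congr {α : Type} (p q : α → Bool) (l : List α) (h : ∀ a ∈ l, p a = q a) :
    l.find? p = l.find? q := by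
  induction l with
  | nil => rfl
  | cons x t ih =>
      simp only [List.find?]
      rw [h x (by simp)]
      cases q x <;> simp [ih fun a ha => h a (by simp [ha])]

-- the fold step inside PySem.List.min?
def pvStep (key : Int → Int) (acc : Option Int) (x : Int) : Option Int :=
  match acc with
  | none => some x
  | some m => if key x < key m then some x else some m

lemma pvMin?_eq_foldl (key : Int → Int) (ws : List Int) :
    PySem.List.min? ws key = List.foldl (pvStep key) none ws := by
  unfold PySem.List.min?
  congr 1
  funext acc x
  cases acc <;> rfl

lemma pvFoldKeep (key : Int → Int) (a0 : Int) (t : List Int) (h : ∀ w ∈ t, ¬ key w < key a0) :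
    List.foldl (pvStep key) (some a0) t = some a0 := by
  induction t with
  | nil => rfl
  | cons x s ih =>
      simp only [List.foldl, pvStep]
      rw [if_neg (h x (by simp))]
      exact ih fun w hw => h w (by simp [hw])

lemma pvFoldFind (key : Int → Int) (r : Int) :
    ∀ (t : List Int) (a m : Int), (∀ w ∈ t, r ≤ key w) → r < key a →
      t.find? (fun w => decide (key w = r)) = some m →
      List.foldl (pvStep key) (some a) t = some m := by
  intro t
  induction t with
  | nil => intro a m _ _ hf; simp at hf
  | cons x s ih =>
      intro a m hlb ha hf
      simp only [List.find?] at hf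
      by_cases hx : key x = r
      · simp [hx] at hf
        subst hf
        simp only [List.foldl, pvStep]
        rw [if_pos (by omega)]
        exact pvFoldKeep key x s (fun w hw => by have := hlb w (by simp [hw]); omega)
      · simp [hx] at hf
        have hxr : r < key x := lt_of_le_of_ne (hlb x (by simp)) (by omega)
        simp only [List.foldl, pvStep]
        split_ifs with hcmp
        · exact ih x m (fun w hw => hlb w (by simp [hw])) hxr hf
        · exact ih a m (fun w hw => hlb w (by simp [hw])) ha hf

lemma pvMin?_eq_of_find? (key : Int → Int) (r : Int) (ws : List Int) (m : Int)
    (hlb : ∀ w ∈ ws, r ≤ key w)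
    (hf : ws.find? (fun w => decide (key w = r)) = some m) :
    PySem.List.min? ws key = some m := by
  cases ws with
  | nil => simp at hf
  | cons x t =>
      simp only [List.find?] at hf
      rw [pvMin?_eq_foldl]
      simp only [List.foldl, pvStep]
      by_cases hx : key x = r
      · simp [hx] at hf
        subst hf
        exact pvFoldKeep key x t (fun w hw => by have := hlb w (by simp [hw]); omega)
      · simp [hx] at hf
        exact pvFoldFind key r t x m (fun w hw => hlb w (by simp [hw]))
          (lt_of_le_of_ne (hlb x (by simp)) (by omega)) hf

-- ===== VERDICT (by name: the statement is the Claim_ definition above) =====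
theorem vote_struct_groups_spec : Claim_equal_vote_struct_groups := by
  intro groups _ hpre
  unfold Spec_vote_struct_groups vote_struct_groups vote_struct_groups_alt
  cases hmax : PySem.List.max? (groups.map (fun g => (g.2.length : Int))) (fun x => x) with
  | none =>
      exact absurd (by simpa using (PySem.List.max?_eq_none_iff _ _).1 hmax) hpre
  | some m =>
      simp only []
      set ws := ((PySem.List.enumerate groups 0).filter
        (fun p => decide ((p.2.2.length : Int) = m))).map (fun p => p.1) with hws
      obtain ⟨g, hg, hgm⟩ := List.mem_map.1 (PySem.List.max?_mem hmax)
      rw [← PySem.List.map_snd_enumerate groups 0] at hg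
      obtain ⟨p, hp, hpg⟩ := List.mem_map.1 hg
      have hp1 : p.1 ∈ ws := by
        rw [hws]
        exact List.mem_map.2 ⟨p, List.mem_filter.2 ⟨hp, by simp [hpg, hgm]⟩, rfl⟩
      have hwsne : ws ≠ [] := List.ne_nil_of_mem hp1
      have hrank : ∀ i : Int, pvRank groups i
          = pvChain (PySem.List.pyGetD groups i ("", ([] : List String))).2 :=
        fun i => pvRank_eq_chain groups i
      by_cases hone : ws.length = 1
      · obtain ⟨w, hw⟩ := List.length_eq_one_iff.1 hone
        rw [if_pos hone, hw, pvMin?_eq_foldl]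
        simp [pvStep, PySem.List.pyGetD_zero_cons]
      · rw [if_neg hone]
        simp only [STRUCT_PRIORITY, pvOuterScan, pvInnerScan_eq_find?]
        cases h0 : ws.find? (fun i =>
            decide ("isocirc" ∈ (PySem.List.pyGetD groups i ("", ([] : List String))).2)) with
        | some i =>
            rw [pvMin?_eq_of_find? (fun i => pvRank groups i) 0 ws i
              (fun w _ => by simp only [hrank]; exact pvChain_nonneg _)
              (by rw [← h0]; exact pvFind?_congr _ _ ws (fun a _ =>
                decide_eq_decide.2 (by simp only [hrank]; exact pvChain_eq_zero_iff _)))]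
        | none =>
            have h0' : ∀ w ∈ ws,
                "isocirc" ∉ (PySem.List.pyGetD groups w ("", ([] : List String))).2 := by
              intro w hwmem; have := List.find?_eq_none.1 h0 w hwmem; simpa using this
            cases h1 : ws.find? (fun i =>
                decide ("cirilong" ∈ (PySem.List.pyGetD groups i ("", ([] : List String))).2)) with
            | some i =>
                rw [pvMin?_eq_of_find? (fun i => pvRank groups i) 1 ws i
                  (fun w hwmem => by simp only [hrank]; exact pvChain_lb1 _ (h0' w hwmem))
                  (by rw [← h1]; exact pvFind?_congr _ _ ws (fun a ha =>
                    decide_eq_decide.2 (by simp only [hrank]; exact pvChain_eq_one_iff _ (h0' a ha))))]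
            | none =>
                have h1' : ∀ w ∈ ws,
                    "cirilong" ∉ (PySem.List.pyGetD groups w ("", ([] : List String))).2 := by
                  intro w hwmem; have := List.find?_eq_none.1 h1 w hwmem; simpa using this
                cases h2 : ws.find? (fun i =>
                    decide ("circnick" ∈ (PySem.List.pyGetD groups i ("", ([] : List String))).2)) with
                | some i =>
                    rw [pvMin?_eq_of_find? (fun i => pvRank groups i) 2 ws i
                      (fun w hwmem => by
                        simp only [hrank]; exact pvChain_lb2 _ (h0' w hwmem) (h1' w hwmem))
                      (by rw [← h2]; exact pvFind?_congr _ _ ws (fun a ha =>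
                        decide_eq_decide.2 (by
                          simp only [hrank]; exact pvChain_eq_two_iff _ (h0' a ha) (h1' a ha))))]
                | none =>
                    have h2' : ∀ w ∈ ws,
                        "circnick" ∉ (PySem.List.pyGetD groups w ("", ([] : List String))).2 := by
                      intro w hwmem; have := List.find?_eq_none.1 h2 w hwmem; simpa using this
                    cases h3 : ws.find? (fun i =>
                        decide ("circfl" ∈ (PySem.List.pyGetD groups i ("", ([] : List String))).2)) with
                    | some i =>
                        rw [pvMin?_eq_of_find? (fun i => pvRank groups i) 3 ws i
                          (fun w hwmem => by
                            simp only [hrank]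
                            exact pvChain_lb3 _ (h0' w hwmem) (h1' w hwmem) (h2' w hwmem))
                          (by rw [← h3]; exact pvFind?_congr _ _ ws (fun a ha =>
                            decide_eq_decide.2 (by
                              simp only [hrank]
                              exact pvChain_eq_three_iff _ (h0' a ha) (h1' a ha) (h2' a ha))))]
                    | none =>
                        have h3' : ∀ w ∈ ws,
                            "circfl" ∉ (PySem.List.pyGetD groups w ("", ([] : List String))).2 := by
                          intro w hwmem
                          have := List.find?_eq_none.1 h3 w hwmem; simpa using this
                        have hall4 : ∀ w ∈ ws, pvRank groups w = 4 := fun w hwmem => by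
                          rw [hrank]
                          exact pvChain_eq_four _ (h0' w hwmem) (h1' w hwmem)
                            (h2' w hwmem) (h3' w hwmem)
                        obtain ⟨w, t, hwt⟩ := List.exists_cons_of_ne_nil hwsne
                        have hw4 : pvRank groups w = 4 := hall4 w (by rw [hwt]; simp)
                        rw [pvMin?_eq_of_find? (fun i => pvRank groups i) 4 ws w
                          (fun x hx => le_of_eq (hall4 x hx).symm)
                          (by rw [hwt]; simp [List.find?, hw4])]
                        rw [hwt, PySem.List.pyGetD_zero_cons]
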